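-- pv_equiv track=rewrite | github.com/anhkhoakz/TDT_Semester_5 | Design and Analysis of Algorithms/midterm/TKN/main2.py | sort_secondary_a_by_total_order
-- ===== SOURCE A (Python) =====
-- def sort_secondary_a_by_total_order(
--     secondary_a: set, ptwu: dict, profits: dict
-- ) -> list:
--     """Sort items in secondary_a based on total order (positive and negative groups)."""
--     positive_items = {
--         item: ptwu[item] for item in secondary_a if profits.get(item, 0) > 0
--     }
--     negative_items = {
--         item: ptwu[item] for item in secondary_a if profits.get(item, 0) < 0
--     }
--     sorted_positive = sorted(positive_items, key=lambda x: positive_items[x])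
--     sorted_negative = sorted(negative_items, key=lambda x: negative_items[x])
--     return sorted_positive + sorted_negative
-- ===== SOURCE B (Python) =====
-- def sort_secondary_a_by_total_order(
--     secondary_a: set, ptwu: dict, profits: dict
-- ) -> list:
--     """Sort items in secondary_a based on total order (positive and negative groups)."""
--     candidates = [item for item in secondary_a if profits.get(item, 0) != 0]
--     return sorted(
--         candidates,
--         key=lambda x: (0 if profits.get(x, 0) > 0 else 1, ptwu[x]),
--     )
-- ===== Notes on version B (the rewrite author's own statement) =====
-- stated objective: simpler
-- what changed: Replaces the two partition dicts and two separate sorts with one filtered list and a single stable sort under the composite key (sign-rank, ptwu value).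
import Mathlib
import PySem

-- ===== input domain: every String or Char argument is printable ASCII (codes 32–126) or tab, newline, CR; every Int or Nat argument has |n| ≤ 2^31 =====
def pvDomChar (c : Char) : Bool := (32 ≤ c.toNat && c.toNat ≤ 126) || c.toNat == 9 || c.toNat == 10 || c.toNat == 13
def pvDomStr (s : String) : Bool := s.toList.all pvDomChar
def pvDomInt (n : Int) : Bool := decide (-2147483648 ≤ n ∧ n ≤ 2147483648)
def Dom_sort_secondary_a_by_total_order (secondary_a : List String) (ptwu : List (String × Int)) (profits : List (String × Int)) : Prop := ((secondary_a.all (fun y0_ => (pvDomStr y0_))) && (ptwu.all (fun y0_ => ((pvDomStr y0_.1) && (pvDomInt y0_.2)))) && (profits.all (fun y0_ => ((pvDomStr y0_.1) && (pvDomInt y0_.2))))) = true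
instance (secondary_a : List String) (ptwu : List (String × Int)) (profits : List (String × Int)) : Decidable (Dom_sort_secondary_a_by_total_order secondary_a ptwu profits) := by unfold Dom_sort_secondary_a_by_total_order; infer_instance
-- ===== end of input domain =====

-- B replaces A's two partition dicts and two separate sorts with one filtered list and a single
-- stable sort under the composite key (sign-rank, ptwu value); objective: simpler.


-- ===== PORT A =====
-- Literal port of A: build the positive/negative dicts by iterating secondary_a, sort each dict's
-- keys by its stored ptwu value, concatenate.
def sort_secondary_a_by_total_order (secondary_a : List String) (ptwu : List (String × Int)) (profits : List (String × Int)) : List String :=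
  let ptwuD := PySem.Dict.ofList ptwu
  let profitsD := PySem.Dict.ofList profits
  let positive_items := secondary_a.foldl
    (fun d item => if profitsD.getD item 0 > 0 then d.insert item (ptwuD.getD item 0) else d)
    PySem.Dict.empty
  let negative_items := secondary_a.foldl
    (fun d item => if profitsD.getD item 0 < 0 then d.insert item (ptwuD.getD item 0) else d)
    PySem.Dict.empty
  let sorted_positive := PySem.List.sorted positive_items.keys (fun x => positive_items.getD x 0)
  let sorted_negative := PySem.List.sorted negative_items.keys (fun x => negative_items.getD x 0)
  sorted_positive ++ sorted_negative

-- ===== PORT B =====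
-- Port of B: one filtered list, one stable sort with the composite key (sign-rank, ptwu value).
def sort_secondary_a_by_total_order_alt (secondary_a : List String) (ptwu : List (String × Int)) (profits : List (String × Int)) : List String :=
  let ptwuD := PySem.Dict.ofList ptwu
  let profitsD := PySem.Dict.ofList profits
  let candidates := secondary_a.filter (fun item => profitsD.getD item 0 != 0)
  PySem.List.sorted2 candidates
    (fun x => if profitsD.getD x 0 > 0 then (0 : Int) else 1)
    (fun x => ptwuD.getD x 0)

-- ===== PRECONDITION & SPEC =====
-- Pre_ requires secondary_a to hold distinct elements (it represents a Python set, whose list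
-- encoding is its distinct elements) and every item whose profit is nonzero to be a key of ptwu
-- (otherwise A raises KeyError on ptwu[item]).
def Pre_sort_secondary_a_by_total_order (secondary_a : List String) (ptwu : List (String × Int)) (profits : List (String × Int)) : Prop :=
  secondary_a.Nodup ∧
  ∀ s ∈ secondary_a, (PySem.Dict.ofList profits).getD s 0 ≠ 0 →
    (PySem.Dict.ofList ptwu).contains s = true
instance (secondary_a : List String) (ptwu : List (String × Int)) (profits : List (String × Int)) : Decidable (Pre_sort_secondary_a_by_total_order secondary_a ptwu profits) := by unfold Pre_sort_secondary_a_by_total_order; infer_instance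

def pvWitness_sort_secondary_a_by_total_order : List String × (List (String × Int)) × (List (String × Int)) :=
  (["a", "b", "c"], [("a", 3), ("b", 1), ("c", 2)], [("a", 1), ("b", -1), ("c", 2)])

def Spec_sort_secondary_a_by_total_order (secondary_a : List String) (ptwu : List (String × Int)) (profits : List (String × Int)) (out : List String) : Prop := out = sort_secondary_a_by_total_order_alt secondary_a ptwu profits
instance (secondary_a : List String) (ptwu : List (String × Int)) (profits : List (String × Int)) (out : List String) : Decidable (Spec_sort_secondary_a_by_total_order secondary_a ptwu profits out) := by unfold Spec_sort_secondary_a_by_total_order; infer_instance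

-- ===== CLAIM (what is proved, stated in full; the proofs are below) =====
def Claim_equal_sort_secondary_a_by_total_order : Prop := ∀ (secondary_a : List String) (ptwu : List (String × Int)) (profits : List (String × Int)), Dom_sort_secondary_a_by_total_order secondary_a ptwu profits → Pre_sort_secondary_a_by_total_order secondary_a ptwu profits → Spec_sort_secondary_a_by_total_order secondary_a ptwu profits (sort_secondary_a_by_total_order secondary_a ptwu profits)

-- ===== LEMMAS AND PROOFS =====

-- insertBy is invariant under a change of comparator that agrees on x vs the list's members.
theorem pv_insertBy_congr {α : Type} (b₁ b₂ : α → α → Bool) (x : α) (ys : List α)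
    (h : ∀ y ∈ ys, b₁ x y = b₂ x y) :
    PySem.List.insertBy b₁ x ys = PySem.List.insertBy b₂ x ys := by
  induction ys with
  | nil => rfl
  | cons y ys ih =>
    simp only [PySem.List.insertBy, h y (by simp)]
    split_ifs with hb
    · rfl
    · simp only [List.cons.injEq, true_and]
      exact ih (fun z hz => h z (by simp [hz]))

-- Lex-insert of a rank-0 element into (rank-0 block ++ rank-1 block) inserts into the first block.
theorem pv_ins0 {α : Type} (r k : α → Int) (x : α) (P N : List α)
    (hx : r x = 0) (hP : ∀ y ∈ P, r y = 0) (hN : ∀ y ∈ N, r y = 1) :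
    PySem.List.insertBy (fun a b => decide (r a < r b) || (!decide (r b < r a) && decide (k a < k b))) x (P ++ N)
      = PySem.List.insertBy (fun a b => decide (k a < k b)) x P ++ N := by
  induction P with
  | nil =>
    cases N with
    | nil => rfl
    | cons n ns =>
      have hn : r n = 1 := hN n (by simp)
      simp [PySem.List.insertBy, hx, hn]
  | cons p ps ih =>
    have hp : r p = 0 := hP p (by simp)
    by_cases hb : k x < k p
    · simp [PySem.List.insertBy, hx, hp, hb]
    · simp only [List.cons_append, PySem.List.insertBy, hx, hp]
      simp only [hb, decide_false]
      simp only [lt_self_iff_false, decide_false, Bool.not_false, Bool.true_and, Bool.false_or,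
        Bool.false_eq_true, if_false, List.cons_append]
      exact congrArg (p :: ·) (ih (fun y hy => hP y (by simp [hy])))

-- Lex-insert of a rank-1 element into (rank-0 block ++ rank-1 block) inserts into the second block.
theorem pv_ins1 {α : Type} (r k : α → Int) (x : α) (P N : List α)
    (hx : r x = 1) (hP : ∀ y ∈ P, r y = 0) (hN : ∀ y ∈ N, r y = 1) :
    PySem.List.insertBy (fun a b => decide (r a < r b) || (!decide (r b < r a) && decide (k a < k b))) x (P ++ N)
      = P ++ PySem.List.insertBy (fun a b => decide (k a < k b)) x N := by
  induction P with
  | nil =>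
    simp only [List.nil_append]
    apply pv_insertBy_congr
    intro y hy
    have : r y = 1 := hN y hy
    simp [hx, this]
  | cons p ps ih =>
    have hp : r p = 0 := hP p (by simp)
    simp only [List.cons_append, PySem.List.insertBy, hx, hp]
    simp [ih (fun y hy => hP y (by simp [hy]))]

-- The insertion-sort fold under the lexicographic (rank, key) comparator splits into the two
-- rank blocks, each insertion-sorted by the key alone.
theorem pv_foldl_split {α : Type} (r k : α → Int) (l : List α) :
    ∀ (P N : List α), (∀ y ∈ P, r y = 0) → (∀ y ∈ N, r y = 1) → (∀ x ∈ l, r x = 0 ∨ r x = 1) →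
    l.foldl (fun acc x => PySem.List.insertBy (fun a b => decide (r a < r b) || (!decide (r b < r a) && decide (k a < k b))) x acc) (P ++ N)
      = (l.filter (fun x => r x == 0)).foldl (fun acc x => PySem.List.insertBy (fun a b => decide (k a < k b)) x acc) P
        ++ (l.filter (fun x => r x == 1)).foldl (fun acc x => PySem.List.insertBy (fun a b => decide (k a < k b)) x acc) N := by
  induction l with
  | nil => intro P N _ _ _; simp
  | cons x l ih =>
    intro P N hP hN hr
    rcases hr x (by simp) with hx | hx
    · have h0 : (r x == 0) = true := by simp [hx]
      have h1 : (r x == 1) = false := by simp [hx]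
      simp only [List.foldl_cons, List.filter_cons, h0, h1, if_true]
      rw [pv_ins0 r k x P N hx hP hN]
      exact ih _ N
        (fun y hy => by
          rcases (PySem.List.mem_insertBy _ x y P).1 hy with h | h
          · simpa [h] using hx
          · exact hP y h)
        hN (fun z hz => hr z (by simp [hz]))
    · have h0 : (r x == 0) = false := by simp [hx]
      have h1 : (r x == 1) = true := by simp [hx]
      simp only [List.foldl_cons, List.filter_cons, h0, h1, if_true]
      rw [pv_ins1 r k x P N hx hP hN]
      exact ih P _
        hP
        (fun y hy => by
          rcases (PySem.List.mem_insertBy _ x y N).1 hy with h | h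
          · simpa [h] using hx
          · exact hN y h)
        (fun z hz => hr z (by simp [hz]))

-- sorted2 with a 0/1-valued first key is the concatenation of the two stably key-sorted blocks.
theorem pv_sorted2_split {α : Type} (r k : α → Int) (l : List α)
    (hr : ∀ x ∈ l, r x = 0 ∨ r x = 1) :
    PySem.List.sorted2 l r k
      = PySem.List.sorted (l.filter (fun x => r x == 0)) k
        ++ PySem.List.sorted (l.filter (fun x => r x == 1)) k := by
  rw [PySem.List.sorted_eq_foldl_insertBy, PySem.List.sorted_eq_foldl_insertBy]
  have := pv_foldl_split r k l [] [] (by simp) (by simp) hr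
  simpa [PySem.List.sorted2] using this

-- Stable sort is invariant under a change of key that agrees on the list's members.
theorem pv_sorted_congr {α : Type} (k₁ k₂ : α → Int) (l : List α)
    (h : ∀ x ∈ l, k₁ x = k₂ x) :
    PySem.List.sorted l k₁ = PySem.List.sorted l k₂ := by
  rw [PySem.List.sorted_eq_foldl_insertBy, PySem.List.sorted_eq_foldl_insertBy]
  suffices H : ∀ (l acc : List α), (∀ x ∈ l, k₁ x = k₂ x) → (∀ y ∈ acc, k₁ y = k₂ y) →
      l.foldl (fun a x => PySem.List.insertBy (fun a b => decide (k₁ a < k₁ b)) x a) acc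
        = l.foldl (fun a x => PySem.List.insertBy (fun a b => decide (k₂ a < k₂ b)) x a) acc by
    exact H l [] h (by simp)
  intro l
  induction l with
  | nil => intro acc _ _; rfl
  | cons x l ih =>
    intro acc hl hacc
    simp only [List.foldl_cons]
    rw [pv_insertBy_congr _ _ x acc
      (fun y hy => by rw [hl x (by simp), hacc y hy])]
    exact ih _ (fun z hz => hl z (by simp [hz]))
      (fun y hy => by
        rcases (PySem.List.mem_insertBy _ x y acc).1 hy with h' | h'
        · exact h' ▸ hl x (by simp)
        · exact hacc y h')

-- A's guarded dict-building fold, characterised: its items are the filtered list paired with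
-- the ptwu values.
theorem pv_dict_items (secondary_a : List String) (hnd : secondary_a.Nodup)
    (p : String → Bool) (v : String → Int) :
    (secondary_a.foldl (fun d item => if p item then d.insert item (v item) else d)
        (PySem.Dict.empty : PySem.Dict String Int)).items
      = (secondary_a.filter p).map (fun a => (a, v a)) := by
  have h1 : secondary_a.foldl (fun d item => if p item then d.insert item (v item) else d)
      (PySem.Dict.empty : PySem.Dict String Int)
      = (secondary_a.filter p).foldl (fun d item => d.insert item (v item)) PySem.Dict.empty := by
    rw [List.foldl_filter]
  rw [h1, PySem.Dict.items_foldl_insert_fresh (secondary_a.filter p) (fun a => a) v _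
    (fun a _ => by simp [PySem.Dict.contains_empty])
    (by simpa using hnd.filter p)]
  simp [PySem.Dict.empty]

theorem sort_secondary_a_spec_aux (secondary_a : List String) (ptwu : List (String × Int)) (profits : List (String × Int))
    (hpre : Pre_sort_secondary_a_by_total_order secondary_a ptwu profits) :
    sort_secondary_a_by_total_order secondary_a ptwu profits
      = sort_secondary_a_by_total_order_alt secondary_a ptwu profits := by
  obtain ⟨hnd, _⟩ := hpre
  unfold sort_secondary_a_by_total_order sort_secondary_a_by_total_order_alt
  set ptwuD := PySem.Dict.ofList ptwu with hptwu
  set profitsD := PySem.Dict.ofList profits with hprof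
  simp only []
  -- characterise the two dicts
  have hposI := pv_dict_items secondary_a hnd (fun item => decide (profitsD.getD item 0 > 0)) (fun item => ptwuD.getD item 0)
  have hnegI := pv_dict_items secondary_a hnd (fun item => decide (profitsD.getD item 0 < 0)) (fun item => ptwuD.getD item 0)
  set posD := secondary_a.foldl (fun d item => if profitsD.getD item 0 > 0 then d.insert item (ptwuD.getD item 0) else d) (PySem.Dict.empty : PySem.Dict String Int) with hposD
  set negD := secondary_a.foldl (fun d item => if profitsD.getD item 0 < 0 then d.insert item (ptwuD.getD item 0) else d) (PySem.Dict.empty : PySem.Dict String Int) with hnegD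
  have hposI' : posD.items = (secondary_a.filter (fun item => decide (profitsD.getD item 0 > 0))).map (fun a => (a, ptwuD.getD a 0)) := by
    rw [hposD]; simpa using hposI
  have hnegI' : negD.items = (secondary_a.filter (fun item => decide (profitsD.getD item 0 < 0))).map (fun a => (a, ptwuD.getD a 0)) := by
    rw [hnegD]; simpa using hnegI
  have hposK : posD.keys = secondary_a.filter (fun item => decide (profitsD.getD item 0 > 0)) := by
    rw [PySem.Dict.keys, hposI', List.map_map]
    exact List.map_id _
  have hnegK : negD.keys = secondary_a.filter (fun item => decide (profitsD.getD item 0 < 0)) := by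
    rw [PySem.Dict.keys, hnegI', List.map_map]
    exact List.map_id _
  have hposKnd : posD.keys.Nodup := by rw [hposK]; exact hnd.filter _
  have hnegKnd : negD.keys.Nodup := by rw [hnegK]; exact hnd.filter _
  -- lookups in the built dicts agree with ptwu's
  have hposG : ∀ x ∈ posD.keys, posD.getD x 0 = ptwuD.getD x 0 := by
    intro x hx
    rw [hposK] at hx
    have : (x, ptwuD.getD x 0) ∈ posD.items := by
      rw [hposI']; exact List.mem_map_of_mem hx
    exact PySem.Dict.getD_of_mem_items posD this hposKnd 0
  have hnegG : ∀ x ∈ negD.keys, negD.getD x 0 = ptwuD.getD x 0 := by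
    intro x hx
    rw [hnegK] at hx
    have : (x, ptwuD.getD x 0) ∈ negD.items := by
      rw [hnegI']; exact List.mem_map_of_mem hx
    exact PySem.Dict.getD_of_mem_items negD this hnegKnd 0
  -- rewrite A's two sorts with ptwu as the key
  rw [pv_sorted_congr _ (fun x => ptwuD.getD x 0) _ hposG,
      pv_sorted_congr _ (fun x => ptwuD.getD x 0) _ hnegG, hposK, hnegK]
  -- split B's composite-key sort
  rw [pv_sorted2_split (fun x => if profitsD.getD x 0 > 0 then (0 : Int) else 1)
      (fun x => ptwuD.getD x 0) _ (fun x _ => by dsimp only; split_ifs <;> simp)]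
  -- identify the two filtered lists on each side
  congr 1
  · congr 1
    rw [List.filter_filter]
    apply List.filter_congr
    intro x _
    by_cases h : profitsD.getD x 0 > 0 <;> simp [h] <;> omega
  · congr 1
    rw [List.filter_filter]
    apply List.filter_congr
    intro x _
    by_cases h : profitsD.getD x 0 > 0
    · simp [h]; omega
    · by_cases h2 : profitsD.getD x 0 < 0 <;> simp [h, h2] <;> omega

-- ===== VERDICT (by name: the statement is the Claim_ definition above) =====
theorem sort_secondary_a_by_total_order_spec : Claim_equal_sort_secondary_a_by_total_order := by
  intro secondary_a ptwu profits _ hpre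
  exact sort_secondary_a_spec_aux secondary_a ptwu profits hpre
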